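-- pv_equiv track=rewrite | github.com/gwkim92/agent-work-harness | src/awh/core.py | _ordered_task_options
-- ===== SOURCE A (Python) =====
-- def _ordered_task_options(options: set[str]) -> list[str]:
--     ordered_names = [
--         "contract",
--         "handoff",
--         "plan",
--         "feature_list",
--         "progress",
--         "init_script",
--         "review",
--         "qa",
--         "roles",
--         "topology",
--         "evidence_manifest",
--         "loop_contract",
--     ]
--     return [name for name in ordered_names if name in options]
-- ===== SOURCE B (Python) =====
-- def _ordered_task_options(options: set[str]) -> list[str]:
--     ordered_names = [
--         "contract",
--         "handoff",
--         "plan",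
--         "feature_list",
--         "progress",
--         "init_script",
--         "review",
--         "qa",
--         "roles",
--         "topology",
--         "evidence_manifest",
--         "loop_contract",
--     ]
--     index = {name: i for i, name in enumerate(ordered_names)}
--     return sorted((o for o in options if o in index), key=index.__getitem__)
-- ===== Notes on version B (the rewrite author's own statement) =====
-- stated objective: alternative
-- what changed: Instead of scanning the fixed 12-name list and filtering by set membership, B builds a rank dict once, scans the input set keeping known names, and sorts them by their rank.
import Mathlib
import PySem

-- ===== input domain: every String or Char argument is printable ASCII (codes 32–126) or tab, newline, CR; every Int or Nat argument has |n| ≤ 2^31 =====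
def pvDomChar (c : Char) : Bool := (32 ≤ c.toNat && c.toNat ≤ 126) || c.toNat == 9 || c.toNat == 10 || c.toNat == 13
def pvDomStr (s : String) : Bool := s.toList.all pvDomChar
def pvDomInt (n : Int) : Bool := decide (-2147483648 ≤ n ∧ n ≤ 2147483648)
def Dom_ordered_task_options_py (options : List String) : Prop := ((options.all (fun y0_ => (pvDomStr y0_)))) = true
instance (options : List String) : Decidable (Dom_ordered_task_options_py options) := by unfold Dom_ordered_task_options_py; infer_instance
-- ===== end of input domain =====

-- B replaces A's scan-the-fixed-list-and-filter with a rank dict over the input set followed by a key sort (alternative decomposition).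


-- ===== PORT A =====
def pvOrderedNames : List String :=
  ["contract", "handoff", "plan", "feature_list", "progress", "init_script",
   "review", "qa", "roles", "topology", "evidence_manifest", "loop_contract"]

def ordered_task_options_py (options : List String) : List String :=
  pvOrderedNames.filter (fun name => options.contains name)

-- ===== PORT B =====
-- index = {name: i for i, name in enumerate(ordered_names)}
def pvIndex : PySem.Dict String Int :=
  (PySem.List.enumerate pvOrderedNames).foldl (fun d p => d.insert p.2 p.1) PySem.Dict.empty

def ordered_task_options_py_alt (options : List String) : List String :=
  PySem.List.sorted (options.filter (fun o => pvIndex.contains o))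
    (fun o => pvIndex.getD o 0) false

-- ===== PRECONDITION & SPEC =====
-- The Python parameter is a set[str]: its List String encoding holds distinct elements.
def Pre_ordered_task_options_py (options : List String) : Prop := options.Nodup
instance (options : List String) : Decidable (Pre_ordered_task_options_py options) := by unfold Pre_ordered_task_options_py; infer_instance
def pvWitness_ordered_task_options_py : List String := ["qa", "plan", "nonsense"]

def Spec_ordered_task_options_py (options : List String) (out : List String) : Prop := out = ordered_task_options_py_alt options
instance (options : List String) (out : List String) : Decidable (Spec_ordered_task_options_py options out) := by unfold Spec_ordered_task_options_py; infer_instance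

-- ===== CLAIM (what is proved, stated in full; the proofs are below) =====
def Claim_equal_ordered_task_options_py : Prop := ∀ (options : List String), Dom_ordered_task_options_py options → Pre_ordered_task_options_py options → Spec_ordered_task_options_py options (ordered_task_options_py options)

-- ===== LEMMAS AND PROOFS =====

theorem pvIndex_eq : pvIndex = PySem.Dict.mk
    [("contract", 0), ("handoff", 1), ("plan", 2), ("feature_list", 3), ("progress", 4),
     ("init_script", 5), ("review", 6), ("qa", 7), ("roles", 8), ("topology", 9),
     ("evidence_manifest", 10), ("loop_contract", 11)] := by decide

theorem pvIndex_contains (o : String) : pvIndex.contains o = pvOrderedNames.contains o := by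
  rw [pvIndex_eq]
  simp only [PySem.Dict.contains_mk, pvOrderedNames, List.any_cons, List.any_nil,
    List.contains_cons, List.contains_nil]
  simp [Bool.or_comm, BEq.comm]

theorem pvNames_pairwise :
    pvOrderedNames.Pairwise (fun a b => pvIndex.getD a 0 < pvIndex.getD b 0) := by
  decide

-- ===== VERDICT (by name: the statement is the Claim_ definition above) =====
theorem ordered_task_options_py_spec : Claim_equal_ordered_task_options_py := by
  intro options _ hnd
  unfold Spec_ordered_task_options_py ordered_task_options_py ordered_task_options_py_alt
  refine (PySem.List.sorted_eq_of_perm_of_pairwise_lt _ _ (fun o => pvIndex.getD o 0) ?_ ?_).symm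
  · refine ((List.perm_ext_iff_of_nodup ?_ ?_).mpr ?_)
    · exact List.filter_sublist.nodup (by decide)
    · exact List.filter_sublist.nodup hnd
    · intro x
      simp only [List.mem_filter, pvIndex_contains]
      constructor
      · rintro ⟨hx, hc⟩
        exact ⟨by simpa using hc, by simpa using hx⟩
      · rintro ⟨ho, hc⟩
        exact ⟨by simpa using hc, by simpa using ho⟩
  · exact List.Pairwise.filter _ pvNames_pairwise
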